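-- pv_equiv track=rewrite | github.com/ZohaibVehra/PokemonSetListing_V2 | getPics.py | picsUrls
-- ===== SOURCE A (Python) =====
-- def picsUrls(code, setplus, holos):
--     s = f'https://pokemoncardimages.s3.us-east-2.amazonaws.com/images/{setplus}/'
--     content = code
--     count = 0
--     Urls = []
--     for i in range(300, 0, -1):
--         if i < 10:
--             a ='00'+str(i)
--         elif i <100:
--             a = '0'+str(i)
--         else:
--             a = str(i)
--
--         if s+a+'.webp' in content and str(i) in holos:
--             Urls.append(s+a+'.webp')
--
--         if s+a+'r.webp' in content:
--             Urls.append(s+a+'r.webp')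
--
--     return Urls, holos
-- ===== SOURCE B (Python) =====
-- # B: one str.find pass over the content collects every occurring (3-digit, r-variant) pair
-- # into a set; a single descending pass then rebuilds the URLs - instead of 600 substring
-- # searches over the whole content.
-- def _parse(tail):
--     if tail[0:3].isdigit():
--         if tail[3:8] == '.webp':
--             return (tail[0:3], False)
--         if tail[3:9] == 'r.webp':
--             return (tail[0:3], True)
--     return None
--
-- def picsUrls(code, setplus, holos):
--     s = f'https://pokemoncardimages.s3.us-east-2.amazonaws.com/images/{setplus}/'
--     n = len(s)
--     found = set()
--     i = code.find(s)
--     while i != -1: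
--         m = _parse(code[i+n:i+n+9])
--         if m is not None:
--             found.add(m)
--         i = code.find(s, i + 1)
--     Urls = []
--     for num in range(300, 0, -1):
--         a = str(num).zfill(3)
--         if (a, False) in found and str(num) in holos:
--             Urls.append(s + a + '.webp')
--         if (a, True) in found:
--             Urls.append(s + a + 'r.webp')
--     return Urls, holos
-- ===== Notes on version B (the rewrite author's own statement) =====
-- stated objective: alternative
-- what changed: Instead of 600 substring searches of the whole content (one per candidate URL), B locates the occurrences of the URL prefix with a single str.find loop, classifies the few characters after each hit into a set of (3-digit number, r-variant) pairs, and rebuilds the URL list in one descending pass over 300..1 with set lookups.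
import Mathlib
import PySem

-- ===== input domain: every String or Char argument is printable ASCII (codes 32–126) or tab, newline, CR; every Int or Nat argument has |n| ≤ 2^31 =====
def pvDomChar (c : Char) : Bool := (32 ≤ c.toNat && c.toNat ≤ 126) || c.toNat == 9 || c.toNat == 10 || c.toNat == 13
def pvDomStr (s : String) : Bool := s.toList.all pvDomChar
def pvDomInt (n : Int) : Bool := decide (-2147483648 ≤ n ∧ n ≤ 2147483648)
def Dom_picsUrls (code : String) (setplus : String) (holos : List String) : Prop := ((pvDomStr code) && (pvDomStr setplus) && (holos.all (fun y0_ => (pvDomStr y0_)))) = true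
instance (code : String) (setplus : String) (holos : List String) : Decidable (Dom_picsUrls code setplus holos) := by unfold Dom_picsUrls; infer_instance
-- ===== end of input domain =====

-- B replaces A's 600 whole-content substring searches by one scan of the content that
-- collects the occurring (3-digit, r?) matches into a set, then one descending rebuild pass.

-- ===== PORT A =====
-- s = f'https://pokemoncardimages.s3.us-east-2.amazonaws.com/images/{setplus}/'  (shared literal)
def pvBase (setplus : String) : List Char :=
  "https://pokemoncardimages.s3.us-east-2.amazonaws.com/images/".toList ++ setplus.toList ++ ['/']

-- the if/elif/else zero-padding of A
def pvPadA (i : Int) : List Char :=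
  if i < 10 then '0' :: '0' :: PySem.Int.toChars i
  else if i < 100 then '0' :: PySem.Int.toChars i
  else PySem.Int.toChars i

def picsUrls (code : String) (setplus : String) (holos : List String) : List String × List String :=
  let s := pvBase setplus
  let content := code.toList
  let Urls := (PySem.List.pyRange 300 0 (-1)).foldl (fun Urls i =>
    let a := pvPadA i
    let Urls := if PySem.Chars.isIn (s ++ a ++ ".webp".toList) content
                    && holos.contains (PySem.Int.toStr i)
                then Urls ++ [String.ofList (s ++ a ++ ".webp".toList)] else Urls
    if PySem.Chars.isIn (s ++ a ++ "r.webp".toList) content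
    then Urls ++ [String.ofList (s ++ a ++ "r.webp".toList)] else Urls) []
  (Urls, holos)

-- ===== PORT B =====
-- the Python helper _parse(tail): classify the 9 characters after an occurrence of s
def pvParseTail (tail : List Char) : Option (List Char × Bool) :=
  if PySem.Chars.strIsdigit (PySem.List.slice tail none (some 3)) then
    if PySem.List.slice tail (some 3) (some 8) = ".webp".toList then
      some (PySem.List.slice tail none (some 3), false)
    else if PySem.List.slice tail (some 3) (some 9) = "r.webp".toList then
      some (PySem.List.slice tail none (some 3), true)
    else none
  else none

-- 'i = code.find(s); while i != -1: m = _parse(code[i+n:i+n+9]); if m is not None: found.add(m);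
--  i = code.find(s, i + 1)' — each find starts strictly right of the previous hit, so
-- len(code)+1 rounds of fuel always suffice (the fuel only makes the recursion structural)
def pvScanLoop (cs s : List Char) (n : Int) :
    Nat → Int → PySem.Set (List Char × Bool) → PySem.Set (List Char × Bool)
  | 0, _, fnd => fnd
  | fuel + 1, i, fnd =>
    if i ≠ -1 then
      let fnd' := match pvParseTail (PySem.List.slice cs (some (i + n)) (some (i + n + 9))) with
        | some m => PySem.Set.add fnd m
        | none => fnd
      pvScanLoop cs s n fuel (PySem.Chars.findFrom cs s (i + 1) none) fnd'
    else fnd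

def picsUrls_alt (code : String) (setplus : String) (holos : List String) : List String × List String :=
  let s := pvBase setplus
  let n := PySem.Chars.len s
  let cs := code.toList
  let found := pvScanLoop cs s n (cs.length + 1) (PySem.Chars.find cs s) PySem.Set.empty
  let Urls := (PySem.List.pyRange 300 0 (-1)).foldl (fun Urls num =>
    let a := PySem.Chars.zfill (PySem.Int.toChars num) 3
    let Urls := if found.contains (a, false) && holos.contains (PySem.Int.toStr num)
                then Urls ++ [String.ofList (s ++ a ++ ".webp".toList)] else Urls
    if found.contains (a, true)
    then Urls ++ [String.ofList (s ++ a ++ "r.webp".toList)] else Urls) []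
  (Urls, holos)

-- ===== PRECONDITION & SPEC =====
def Spec_picsUrls (code : String) (setplus : String) (holos : List String) (out : List String × List String) : Prop := out = picsUrls_alt code setplus holos
instance (code : String) (setplus : String) (holos : List String) (out : List String × List String) : Decidable (Spec_picsUrls code setplus holos out) := by unfold Spec_picsUrls; infer_instance

-- ===== CLAIM (what is proved, stated in full; the proofs are below) =====
def Claim_equal_picsUrls : Prop := ∀ (code : String) (setplus : String) (holos : List String), Dom_picsUrls code setplus holos → Spec_picsUrls code setplus holos (picsUrls code setplus holos)

-- ===== LEMMAS AND PROOFS =====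

-- proof-side recombination: the occurrence test plus the tail parse at one position
def pvParse (cs s : List Char) (n i : Int) : Option (List Char × Bool) :=
  if PySem.List.slice cs (some i) (some (i + n)) = s then
    pvParseTail (PySem.List.slice cs (some (i + n)) (some (i + n + 9)))
  else none

theorem pvBase_ne_nil (setplus : String) : pvBase setplus ≠ [] := by
  simp [pvBase]

-- the occurrence test of pvParse is exactly 's starts at j'
theorem pv_cond_iff (cs s : List Char) (j : Nat) :
    PySem.List.slice cs (some (j : Int)) (some ((j : Int) + PySem.Chars.len s)) = s ↔
      s <+: cs.drop j := by
  rw [PySem.Chars.len_eq, PySem.List.slice_natCast_add cs j s.length,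
      List.prefix_iff_eq_take, eq_comm]

-- a parse hit exhibits an occurrence of s
theorem pv_parse_occ (cs s : List Char) (j : Nat) (p : List Char × Bool)
    (h : pvParse cs s (PySem.Chars.len s) (j : Int) = some p) : s <+: cs.drop j := by
  rw [← pv_cond_iff]
  by_contra hc
  rw [pvParse, if_neg hc] at h
  cases h

-- at an occurrence, pvParse is the loop body's tail parse
theorem pv_parse_at_occ (cs s : List Char) (j : Nat) (h : s <+: cs.drop j) :
    pvParse cs s (PySem.Chars.len s) (j : Int) =
      pvParseTail (PySem.List.slice cs (some ((j : Int) + PySem.Chars.len s))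
        (some ((j : Int) + PySem.Chars.len s + 9))) := by
  rw [pvParse, if_pos ((pv_cond_iff cs s j).mpr h)]

-- membership in the found-set built by B's find loop
theorem pv_mem_scanLoop (cs s : List Char) (hs : s ≠ []) :
    ∀ (fuel k : Nat), k ≤ cs.length → cs.length - k < fuel →
      ∀ (fnd : PySem.Set (List Char × Bool)) (p : List Char × Bool),
      (p ∈ pvScanLoop cs s (PySem.Chars.len s) fuel (PySem.Chars.findFrom cs s (k : Int) none) fnd ↔
        p ∈ fnd ∨ ∃ i : Nat, k ≤ i ∧ pvParse cs s (PySem.Chars.len s) (i : Int) = some p) := by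
  intro fuel
  induction fuel with
  | zero => intro k hk hf; omega
  | succ fuel ih =>
    intro k hk hf fnd p
    by_cases hr : PySem.Chars.findFrom cs s (k : Int) none = -1
    · have hno : ¬ s <:+: cs.drop k :=
        (PySem.Chars.findFrom_natCast_eq_neg_one_iff cs s k hk).mp hr
      rw [hr]
      simp only [pvScanLoop, ne_eq, not_true_eq_false, if_false]
      constructor
      · exact Or.inl
      · rintro (h1 | ⟨i, hki, hp⟩)
        · exact h1
        · exfalso
          apply hno
          have hocc := pv_parse_occ cs s i p hp
          have hdd : cs.drop i = (cs.drop k).drop (i - k) := by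
            rw [List.drop_drop]; congr 1; omega
          rw [hdd] at hocc
          exact List.infix_iff_prefix_suffix.mpr ⟨_, hocc, List.drop_suffix _ _⟩
    · obtain ⟨hkr, hocc, hmin⟩ := PySem.Chars.findFrom_natCast_spec cs s k hk hr
      set r := PySem.Chars.findFrom cs s (k : Int) none with hrdef
      have hr0 : (0 : Int) ≤ r := le_trans (Int.natCast_nonneg k) hkr
      have hsl : 0 < s.length := List.length_pos_of_ne_nil hs
      have hrl : r.toNat < cs.length := by
        have hlen := hocc.length_le
        rw [List.length_drop] at hlen
        omega
      have hkr' : k ≤ r.toNat := by omega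
      have hr' : r = ((r.toNat : Nat) : Int) := (Int.toNat_of_nonneg hr0).symm
      have hpar := pv_parse_at_occ cs s r.toNat hocc
      simp only [pvScanLoop]
      rw [if_pos hr, hr']
      have hnext : ((r.toNat : Nat) : Int) + 1 = (((r.toNat + 1 : Nat)) : Int) := by push_cast; ring
      rw [hnext, ih (r.toNat + 1) (by omega) (by omega), ← hpar]
      cases hp : pvParse cs s (PySem.Chars.len s) ((r.toNat : Nat) : Int) with
      | some m =>
        rw [PySem.Set.mem_add]
        constructor
        · rintro ((h1 | rfl) | ⟨j, hj, hpj⟩)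
          · exact Or.inl h1
          · exact Or.inr ⟨r.toNat, hkr', hp⟩
          · exact Or.inr ⟨j, by omega, hpj⟩
        · rintro (h1 | ⟨j, hj, hpj⟩)
          · exact Or.inl (Or.inl h1)
          · rcases Nat.lt_trichotomy j r.toNat with hlt | rfl | hgt
            · exact absurd (pv_parse_occ cs s j p hpj) (hmin j hj hlt)
            · rw [hp] at hpj
              exact Or.inl (Or.inr (by cases hpj; rfl))
            · exact Or.inr ⟨j, by omega, hpj⟩
      | none =>
        constructor
        · rintro (h1 | ⟨j, hj, hpj⟩)
          · exact Or.inl h1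
          · exact Or.inr ⟨j, by omega, hpj⟩
        · rintro (h1 | ⟨j, hj, hpj⟩)
          · exact Or.inl h1
          · rcases Nat.lt_trichotomy j r.toNat with hlt | rfl | hgt
            · exact absurd (pv_parse_occ cs s j p hpj) (hmin j hj hlt)
            · rw [hp] at hpj; cases hpj
            · exact Or.inr ⟨j, by omega, hpj⟩

-- pvParse at a nonnegative index, with the slices evaluated to drop/take form
theorem pv_parse_eq (cs s : List Char) (j : Nat) :
    pvParse cs s (PySem.Chars.len s) (j : Int) =
      (if (cs.drop j).take s.length = s then
        if PySem.Chars.strIsdigit (((cs.drop (j + s.length)).take 9).take 3) then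
          if ((((cs.drop (j + s.length)).take 9).drop 3).take 5) = ".webp".toList then
            some (((cs.drop (j + s.length)).take 9).take 3, false)
          else if ((((cs.drop (j + s.length)).take 9).drop 3).take 6) = "r.webp".toList then
            some (((cs.drop (j + s.length)).take 9).take 3, true)
          else none
        else none
      else none) := by
  have e3 : PySem.List.slice cs (some ((j : Int) + (s.length : Int))) (some ((j : Int) + (s.length : Int) + 9))
      = (cs.drop (j + s.length)).take 9 := by
    simpa using PySem.List.slice_natCast_add cs (j + s.length) 9
  simp only [pvParse, pvParseTail, PySem.Chars.len_eq]
  simp [PySem.List.slice_natCast_add, e3, PySem.List.slice_to, PySem.List.slice_toNat]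
  rfl

-- from an occurrence decomposition, build the infix fact A tests for
theorem pv_occ (cs s tail w : List Char) (j k : Nat)
    (h1 : (cs.drop j).take s.length = s)
    (htail : tail = (cs.drop (j + s.length)).take 9)
    (hwl : (tail.drop 3).take k = w) :
    (s ++ tail.take 3 ++ w) <:+: cs := by
  have hs : cs.drop j = s ++ cs.drop (j + s.length) := by
    have h1' : s <+: cs.drop j := List.prefix_iff_eq_take.mpr h1.symm
    calc cs.drop j = s ++ (cs.drop j).drop s.length := (List.prefix_iff_eq_append.mp h1').symm
      _ = s ++ cs.drop (j + s.length) := by rw [List.drop_drop]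
  have hw : tail.drop 3 = w ++ (tail.drop 3).drop k := by
    rw [← hwl]; exact (List.take_append_drop k _).symm
  have hw' : tail = tail.take 3 ++ (w ++ (tail.drop 3).drop k) := by
    have := congrArg (fun t => tail.take 3 ++ t) hw
    simpa [List.take_append_drop] using this
  obtain ⟨z2, hz2⟩ := List.take_prefix 9 (cs.drop (j + s.length))
  refine ⟨cs.take j, (tail.drop 3).drop k ++ z2, ?_⟩
  conv_rhs => rw [← List.take_append_drop j cs, hs, ← hz2, ← htail, hw']
  simp [List.append_assoc]

-- a successful parse at i exhibits the pattern as an infix of the content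
theorem pv_parse_fwd (cs s a : List Char) (b : Bool) (i : Int) (hi : 0 ≤ i)
    (h : pvParse cs s (PySem.Chars.len s) i = some (a, b)) :
    (s ++ a ++ (if b then "r.webp".toList else ".webp".toList)) <:+: cs := by
  obtain ⟨j, rfl⟩ : ∃ j : Nat, i = (j : Int) := ⟨i.toNat, (Int.toNat_of_nonneg hi).symm⟩
  rw [pv_parse_eq] at h
  split_ifs at h with h1 h2 h3 h4
  all_goals first
    | exact Option.noConfusion h
    | (rw [Option.some.injEq, Prod.mk.injEq] at h
       obtain ⟨rfl, rfl⟩ := h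
       first
         | exact pv_occ cs s _ _ j 5 h1 rfl h3
         | exact pv_occ cs s _ _ j 6 h1 rfl h4)

-- conversely, an occurrence of the pattern yields a successful parse
theorem pv_parse_bwd (cs s a : List Char) (b : Bool) (ha3 : a.length = 3)
    (had : PySem.Chars.strIsdigit a = true)
    (h : (s ++ a ++ (if b then "r.webp".toList else ".webp".toList)) <:+: cs) :
    ∃ i : Nat, pvParse cs s (PySem.Chars.len s) (i : Int) = some (a, b) := by
  have e5 : (".webp".toList).length = 5 := by decide
  have e6 : ("r.webp".toList).length = 6 := by decide
  obtain ⟨u, v, huv⟩ := h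
  set w : List Char := if b then "r.webp".toList else ".webp".toList with hwdef
  have hw5 : 5 ≤ w.length := by cases b <;> simp [hwdef]
  refine ⟨u.length, ?_⟩
  rw [pv_parse_eq]
  have hd : cs.drop u.length = s ++ (a ++ w ++ v) := by
    rw [← huv, List.append_assoc, List.drop_left]
    simp [List.append_assoc]
  have h1 : (cs.drop u.length).take s.length = s := by
    rw [hd, List.take_left]
  have h2 : (cs.drop u.length).drop s.length = cs.drop (u.length + s.length) := by
    rw [List.drop_drop]
  have hrest : cs.drop (u.length + s.length) = a ++ w ++ v := by
    rw [← h2, hd, List.drop_left]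
  have htail3 : ((cs.drop (u.length + s.length)).take 9).take 3 = a := by
    rw [hrest, List.take_take]
    norm_num
    rw [List.take_left' ha3]
  have hdrop3 : ((cs.drop (u.length + s.length)).take 9).drop 3 = (w ++ v).take 6 := by
    rw [hrest, List.drop_take]
    norm_num
    rw [List.drop_left' ha3]
  rw [if_pos h1, htail3, if_pos had]
  cases b with
  | false =>
    have hx : ((w ++ v).take 6).take 5 = ".webp".toList := by
      rw [List.take_take]
      norm_num
      rw [hwdef]
      simp only [if_false, Bool.false_eq_true]
      rw [List.take_append_of_le_length (by rw [e5]), ← e5, List.take_length]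
    rw [hdrop3, if_pos hx]
  | true =>
    have hx5 : ((w ++ v).take 6).take 5 = "r.web".toList := by
      rw [List.take_take]
      norm_num
      rw [hwdef]
      simp only [if_true]
      rw [List.take_append_of_le_length (by rw [e6]; omega)]
      decide
    have hx6 : ((w ++ v).take 6).take 6 = "r.webp".toList := by
      rw [List.take_take]
      norm_num
      rw [hwdef]
      simp only [if_true]
      rw [List.take_append_of_le_length (by rw [e6]), ← e6, List.take_length]
    have hne : ((w ++ v).take 6).take 5 ≠ ".webp".toList := by
      rw [hx5]; decide
    rw [hdrop3, if_neg hne, if_pos hx6]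

-- A's substring test equals a lookup in B's found-set, for a 3-digit key
theorem pv_key (code setplus : String) (a : List Char) (b : Bool)
    (ha3 : a.length = 3) (had : PySem.Chars.strIsdigit a = true) :
    PySem.Chars.isIn (pvBase setplus ++ a ++ (if b then "r.webp".toList else ".webp".toList)) code.toList
      = PySem.Set.contains
          (pvScanLoop code.toList (pvBase setplus) (PySem.Chars.len (pvBase setplus))
            (code.toList.length + 1) (PySem.Chars.find code.toList (pvBase setplus)) PySem.Set.empty)
          (a, b) := by
  have hmem := pv_mem_scanLoop code.toList (pvBase setplus) (pvBase_ne_nil setplus)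
      (code.toList.length + 1) 0 (Nat.zero_le _) (by omega) PySem.Set.empty (a, b)
  rw [Nat.cast_zero, PySem.Chars.findFrom_zero] at hmem
  rw [Bool.eq_iff_iff, PySem.Chars.isIn_iff_infix, PySem.Set.contains_iff, hmem]
  constructor
  · intro h
    obtain ⟨i, hp⟩ := pv_parse_bwd _ _ _ b ha3 had h
    exact Or.inr ⟨i, Nat.zero_le i, hp⟩
  · rintro (h | ⟨i, _, hp⟩)
    · simp [PySem.Set.empty] at h
    · exact pv_parse_fwd _ _ _ b (i : Int) (Int.natCast_nonneg i) hp

-- per-number facts about the two paddings, checked once for all 300 numbers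
set_option maxRecDepth 10000 in
theorem pv_pad_facts : ∀ num ∈ PySem.List.pyRange 300 0 (-1),
    pvPadA num = PySem.Chars.zfill (PySem.Int.toChars num) 3 ∧
    PySem.Chars.strIsdigit (PySem.Chars.zfill (PySem.Int.toChars num) 3) = true ∧
    (PySem.Chars.zfill (PySem.Int.toChars num) 3).length = 3 := by
  decide

-- ===== VERDICT (by name: the statement is the Claim_ definition above) =====
set_option maxHeartbeats 1000000 in
theorem picsUrls_spec : Claim_equal_picsUrls := by
  intro code setplus holos _
  unfold Spec_picsUrls picsUrls picsUrls_alt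
  simp only [Prod.mk.injEq, and_true]
  apply PySem.List.foldl_congr_mem
  intro acc num hnum
  obtain ⟨hpad, hdig, hlen⟩ := pv_pad_facts num hnum
  have k1 := pv_key code setplus (PySem.Chars.zfill (PySem.Int.toChars num) 3) false hlen hdig
  have k2 := pv_key code setplus (PySem.Chars.zfill (PySem.Int.toChars num) 3) true hlen hdig
  simp only [Bool.false_eq_true, if_false, if_true] at k1 k2
  simp only [hpad, k1, k2]
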